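-- pv_equiv track=rewrite | github.com/artifishioly-intelligont/Python-Saturn | saturn/discover/__init__.py | condense_error_paths
-- ===== SOURCE A (Python) =====
-- def condense_error_paths(image_direction_dict):
--     failed_urls = {}
--     for url_and_direction, error in image_direction_dict.items():
--         url = url_and_direction.split('#')[0]
--         direction = url_and_direction.split('#')[1]
--         if url in failed_urls:
--             failed_urls[url] += "{}:{};".format(direction, error)
--         else:
--             failed_urls[url] = "{}:{};".format(direction,error)
--     return failed_urls
-- ===== SOURCE B (Python) =====
-- def condense_error_paths(image_direction_dict):
--     items = list(image_direction_dict.items())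
--     urls = []
--     for key, _ in items:
--         url = key.split('#')[0]
--         if url not in urls:
--             urls.append(url)
--     return {url: ''.join('{}:{};'.format(key.split('#')[1], error)
--                          for key, error in items
--                          if key.split('#')[0] == url)
--             for url in urls}
-- ===== Notes on version B (the rewrite author's own statement) =====
-- stated objective: alternative
-- what changed: Replaces A's single-pass dict accumulation with a two-phase nested-scan algorithm: one pass collects the distinct url prefixes in first-occurrence order, then for each url a full scan over the items filters its entries and joins their formatted fragments; no accumulating dict is kept at all.
import Mathlib
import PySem

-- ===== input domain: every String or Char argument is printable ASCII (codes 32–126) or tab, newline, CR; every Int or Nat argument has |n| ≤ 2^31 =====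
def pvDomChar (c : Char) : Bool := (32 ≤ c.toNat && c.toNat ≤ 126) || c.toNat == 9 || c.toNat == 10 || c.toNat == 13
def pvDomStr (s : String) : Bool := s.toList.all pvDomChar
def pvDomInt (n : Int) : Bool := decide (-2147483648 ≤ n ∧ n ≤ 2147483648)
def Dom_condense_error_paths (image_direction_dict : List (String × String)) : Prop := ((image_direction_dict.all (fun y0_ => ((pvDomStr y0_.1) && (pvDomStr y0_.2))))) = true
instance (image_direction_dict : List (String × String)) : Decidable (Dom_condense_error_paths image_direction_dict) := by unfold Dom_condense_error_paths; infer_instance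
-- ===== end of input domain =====

-- B replaces A's single-pass dict accumulation by a two-phase nested-scan algorithm
-- (distinct-url pass, then a per-url filter-and-join scan over all items); objective: alternative.


-- ===== PORT A =====
-- 'key.split('#')' → (PySem.Str.split? key "#").getD [] (split? is none only for sep = "", never here);
-- 'parts[0]' / 'parts[1]' → pyGet? with .getD "" (pyGet? none = IndexError; Pre_ excludes keys without
-- '#', where parts[1] would raise); 'url in failed_urls' / 'failed_urls[url]' → Dict.contains /
-- Dict.getD (the lookup is only reached when contains holds, so getD equals Python's d[url] there).
def condense_error_paths (image_direction_dict : List (String × String)) : List (String × String) :=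
  (image_direction_dict.foldl
    (fun (failed_urls : PySem.Dict String String) kv =>
      let url := (PySem.List.pyGet? ((PySem.Str.split? kv.1 "#").getD []) 0).getD ""
      let direction := (PySem.List.pyGet? ((PySem.Str.split? kv.1 "#").getD []) 1).getD ""
      if failed_urls.contains url then
        failed_urls.insert url (failed_urls.getD url "" ++ (direction ++ ":" ++ kv.2 ++ ";"))
      else
        failed_urls.insert url (direction ++ ":" ++ kv.2 ++ ";"))
    PySem.Dict.empty).items

-- ===== PORT B =====
-- phase 1: 'if url not in urls: urls.append(url)' → if !urls.contains url then urls ++ [url] else urls;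
-- phase 2: the dict comprehension over urls with ''.join of a filtered generator →
-- map over urls of (url, PySem.Str.join "" (filter-then-map over the items)).
def condense_error_paths_alt (image_direction_dict : List (String × String)) : List (String × String) :=
  let urls : List String :=
    image_direction_dict.foldl
      (fun urls kv =>
        let url := (PySem.List.pyGet? ((PySem.Str.split? kv.1 "#").getD []) 0).getD ""
        if !(urls.contains url) then urls ++ [url] else urls)
      []
  urls.map (fun url =>
    (url, PySem.Str.join ""
      ((image_direction_dict.filter
          (fun kv => ((PySem.List.pyGet? ((PySem.Str.split? kv.1 "#").getD []) 0).getD "") == url)).map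
        (fun kv => (PySem.List.pyGet? ((PySem.Str.split? kv.1 "#").getD []) 1).getD "" ++ ":" ++ kv.2 ++ ";"))))

-- ===== PRECONDITION & SPEC =====
-- Pre_ excludes exactly the inputs where Python A raises: a key with no '#' makes
-- url_and_direction.split('#')[1] an IndexError (B raises identically on such a key).
def Pre_condense_error_paths (image_direction_dict : List (String × String)) : Prop :=
  (image_direction_dict.all (fun kv => PySem.Str.isIn "#" kv.1)) = true
instance (image_direction_dict : List (String × String)) : Decidable (Pre_condense_error_paths image_direction_dict) := by unfold Pre_condense_error_paths; infer_instance
def pvWitness_condense_error_paths : (List (String × String)) :=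
  [("u#up", "e1"), ("u#down", "e2"), ("v#left", "e3")]
def Spec_condense_error_paths (image_direction_dict : List (String × String)) (out : List (String × String)) : Prop := out = condense_error_paths_alt image_direction_dict
instance (image_direction_dict : List (String × String)) (out : List (String × String)) : Decidable (Spec_condense_error_paths image_direction_dict out) := by unfold Spec_condense_error_paths; infer_instance

-- ===== CLAIM (what is proved, stated in full; the proofs are below) =====
def Claim_equal_condense_error_paths : Prop := ∀ (image_direction_dict : List (String × String)), Dom_condense_error_paths image_direction_dict → Pre_condense_error_paths image_direction_dict → Spec_condense_error_paths image_direction_dict (condense_error_paths image_direction_dict)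

-- ===== LEMMAS AND PROOFS =====

-- the key (url) and fragment computed from one item, exactly as both ports compute them
def pvK (kv : String × String) : String :=
  (PySem.List.pyGet? ((PySem.Str.split? kv.1 "#").getD []) 0).getD ""
def pvF (kv : String × String) : String :=
  (PySem.List.pyGet? ((PySem.Str.split? kv.1 "#").getD []) 1).getD "" ++ ":" ++ kv.2 ++ ";"

-- A's loop body (definitionally equal to the lambda in the port of A)
def pvStepA (d : PySem.Dict String String) (kv : String × String) : PySem.Dict String String :=
  if d.contains (pvK kv) then d.insert (pvK kv) (d.getD (pvK kv) "" ++ pvF kv)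
  else d.insert (pvK kv) (pvF kv)

-- B's first phase (definitionally equal to the lambda in the port of B)
def pvStepU (urls : List String) (kv : String × String) : List String :=
  if !(urls.contains (pvK kv)) then urls ++ [pvK kv] else urls
def pvUrls (l : List (String × String)) : List String := l.foldl pvStepU []

-- B's second-phase value for one url
def pvConcat (l : List (String × String)) (u : String) : String :=
  PySem.Str.join "" ((l.filter (fun kv => pvK kv == u)).map pvF)

lemma pvIntersperseNilFlatten (l : List (List Char)) :
    (List.intersperse [] l).flatten = l.flatten := by
  induction l with
  | nil => simp
  | cons a t ih => cases t <;> simp_all [List.intersperse]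

lemma pvJoinAppendSingleton (l : List String) (x : String) :
    PySem.Str.join "" (l ++ [x]) = PySem.Str.join "" l ++ x := by
  simp [PySem.Str.join, PySem.Chars.join, List.intercalate, pvIntersperseNilFlatten]

lemma pvConcat_append (l : List (String × String)) (kv : String × String) (u : String) :
    pvConcat (l ++ [kv]) u = pvConcat l u ++ (if pvK kv == u then pvF kv else "") := by
  unfold pvConcat
  rw [List.filter_append]
  by_cases h : (pvK kv == u) = true
  · have hf : ([kv].filter (fun kv => pvK kv == u)) = [kv] := by simp [h]
    rw [hf, List.map_append, List.map_singleton, pvJoinAppendSingleton, if_pos h]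
  · have hf : ([kv].filter (fun kv => pvK kv == u)) = [] := by simp [h]
    simp [hf, h]

lemma pvGet?MkMap (us : List String) (g : String → String) (x : String) :
    (PySem.Dict.mk (us.map (fun u => (u, g u)))).get? x
      = if x ∈ us then some (g x) else none := by
  induction us with
  | nil => simp [PySem.Dict.get?]
  | cons a t ih =>
    simp only [List.map_cons]
    rw [PySem.Dict.get?_mk_cons]
    by_cases h : a = x
    · subst h; simp
    · simp only [beq_iff_eq, h, if_false, ih, List.mem_cons]
      by_cases hx : x ∈ t <;> simp [hx, Ne.symm h]

lemma pvUrls_append (l : List (String × String)) (kv : String × String) :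
    pvUrls (l ++ [kv]) = pvStepU (pvUrls l) kv := by
  unfold pvUrls
  rw [List.foldl_append]
  rfl

lemma pvUrlsFold_mono {a : String} :
    ∀ (l : List (String × String)) (init : List String), a ∈ init → a ∈ l.foldl pvStepU init := by
  intro l
  induction l with
  | nil => intro init h; exact h
  | cons kv t ih =>
    intro init h
    rw [List.foldl_cons]
    apply ih
    by_cases hc : pvK kv ∈ init
    · have hs : pvStepU init kv = init := by unfold pvStepU; simp [hc]
      rw [hs]; exact h
    · have hs : pvStepU init kv = init ++ [pvK kv] := by unfold pvStepU; simp [hc]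
      rw [hs]; exact List.mem_append_left _ h

lemma pvK_mem_urlsFold {x : String × String} :
    ∀ (l : List (String × String)) (init : List String), x ∈ l → pvK x ∈ l.foldl pvStepU init := by
  intro l
  induction l with
  | nil => intro init h; simp at h
  | cons kv t ih =>
    intro init h
    rw [List.foldl_cons]
    rcases List.mem_cons.mp h with h | h
    · subst h
      apply pvUrlsFold_mono
      by_cases hc : pvK x ∈ init
      · have hs : pvStepU init x = init := by unfold pvStepU; simp [hc]
        rw [hs]; exact hc
      · have hs : pvStepU init x = init ++ [pvK x] := by unfold pvStepU; simp [hc]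
        rw [hs]; exact List.mem_append_right _ (List.mem_singleton.mpr rfl)
    · exact ih _ h

lemma pvK_mem_urls {x : String × String} {l : List (String × String)} (h : x ∈ l) :
    pvK x ∈ pvUrls l := pvK_mem_urlsFold l [] h

lemma pvConcat_nil_of_not_mem {l : List (String × String)} {u : String}
    (h : u ∉ pvUrls l) : pvConcat l u = "" := by
  unfold pvConcat
  have hf : l.filter (fun kv => pvK kv == u) = [] := by
    apply List.filter_eq_nil_iff.mpr
    intro kv hkv hbeq
    exact h (beq_iff_eq.mp hbeq ▸ pvK_mem_urls hkv)
  rw [hf]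
  rfl

-- characterisation of A's accumulating fold as B's urls-and-concat table
lemma pvFoldChar (l : List (String × String)) :
    l.foldl pvStepA PySem.Dict.empty
    = PySem.Dict.mk ((pvUrls l).map (fun u => (u, pvConcat l u))) := by
  induction l using List.reverseRecOn with
  | nil => rfl
  | append_singleton l kv ih =>
    rw [List.foldl_append, List.foldl_cons, List.foldl_nil, ih]
    have hget := pvGet?MkMap (pvUrls l) (pvConcat l)
    have hcont : (PySem.Dict.mk ((pvUrls l).map (fun u => (u, pvConcat l u)))).contains (pvK kv)
        = decide (pvK kv ∈ pvUrls l) := by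
      rw [PySem.Dict.contains_eq_isSome_get?, hget]
      by_cases h : pvK kv ∈ pvUrls l <;> simp [h]
    unfold pvStepA
    by_cases hmem : pvK kv ∈ pvUrls l
    · -- existing url: in-place update; urls unchanged
      rw [if_pos (by rw [hcont]; exact decide_eq_true hmem)]
      apply PySem.Dict.ext
      rw [PySem.Dict.items_insert_of_contains _ _ (by rw [hcont]; exact decide_eq_true hmem)]
      show ((pvUrls l).map _).map _ = (pvUrls (l ++ [kv])).map _
      have hurls : pvUrls (l ++ [kv]) = pvUrls l := by
        rw [pvUrls_append]
        unfold pvStepU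
        simp [hmem]
      rw [hurls, List.map_map]
      apply List.map_congr_left
      intro u hu
      simp only [Function.comp_apply]
      by_cases h : u = pvK kv
      · subst h
        simp only [beq_self_eq_true, if_true]
        have hgd : (PySem.Dict.mk ((pvUrls l).map (fun u => (u, pvConcat l u)))).getD (pvK kv) ""
            = pvConcat l (pvK kv) := by
          rw [PySem.Dict.getD_eq_get?_getD, hget]
          simp [hmem]
        rw [hgd, pvConcat_append]
        simp
      · simp only [beq_iff_eq, h, if_false]
        rw [pvConcat_append]
        simp [Ne.symm h]
    · -- new url: append at the end
      rw [if_neg (by rw [hcont]; simpa using hmem)]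
      apply PySem.Dict.ext
      rw [PySem.Dict.items_insert_of_not_contains _ _ (by rw [hcont]; simpa using hmem)]
      show (pvUrls l).map _ ++ [(pvK kv, _)] = (pvUrls (l ++ [kv])).map _
      have hurls : pvUrls (l ++ [kv]) = pvUrls l ++ [pvK kv] := by
        rw [pvUrls_append]
        unfold pvStepU
        simp [hmem]
      rw [hurls, List.map_append, List.map_singleton]
      congr 1
      · apply List.map_congr_left
        intro u hu
        rw [pvConcat_append]
        have hne : ¬ (pvK kv == u) = true := by
          simp only [beq_iff_eq]
          rintro rfl
          exact hmem hu
        simp [hne]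
      · rw [pvConcat_append, pvConcat_nil_of_not_mem hmem]
        simp

-- ===== VERDICT (by name: the statement is the Claim_ definition above) =====
theorem condense_error_paths_spec : Claim_equal_condense_error_paths := by
  intro l _ _
  unfold Spec_condense_error_paths
  have ha : condense_error_paths l = (l.foldl pvStepA PySem.Dict.empty).items := rfl
  have hb : condense_error_paths_alt l = (pvUrls l).map (fun u => (u, pvConcat l u)) := rfl
  rw [ha, hb, pvFoldChar]
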